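-- pv_equiv track=rewrite | github.com/shameleon/codingame | Python_puzzles/hard/obsolete-programming/obsolete_programming_70pc.py | get_condition_indexes
-- ===== SOURCE A (Python) =====
-- def get_condition_indexes(start_idx, tokens):
--     i = start_idx
--     k = -1
--     cond = dict(zip(['IF', 'ELS', 'FI'], [None] * 3))
--     while i < len(tokens):
--         if tokens[i] == 'IF':
--             if cond['IF'] == None:
--                 cond['IF'] = i
--             k += 1
--         elif tokens[i] == 'ELS':
--             if k == 0 and cond['ELS'] == None:
--                 cond['ELS'] = i
--         elif tokens[i] == 'FI':
--             if k == 0 and cond['FI'] == None: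
--                 cond['FI'] = i
--             k -= 1
--         i += 1
--     return cond
-- ===== SOURCE B (Python) =====
-- def get_condition_indexes(start_idx, tokens):
--     # Different decomposition: materialize the visited (index, token) pairs,
--     # precompute the nesting depth *before* each token (start at -1, IF:+1, FI:-1),
--     # then answer each key with an independent first-match search.
--     visited = [(i, tokens[i]) for i in range(start_idx, len(tokens))]
--     depths = []
--     k = -1
--     for _, tok in visited:
--         depths.append(k)
--         if tok == 'IF':
--             k += 1
--         elif tok == 'FI':
--             k -= 1
--     return {
--         'IF': next((i for i, tok in visited if tok == 'IF'), None),
--         'ELS': next((i for (i, tok), d in zip(visited, depths) if tok == 'ELS' and d == 0), None),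
--         'FI': next((i for (i, tok), d in zip(visited, depths) if tok == 'FI' and d == 0), None),
--     }
-- ===== Notes on version B (the rewrite author's own statement) =====
-- stated objective: alternative
-- what changed: A's single stateful while-loop (mutable depth counter and in-place dict updates) is replaced by building the visited (index, token) list, precomputing a depth-before list, and answering each of the three keys with an independent first-match search.
import Mathlib
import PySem

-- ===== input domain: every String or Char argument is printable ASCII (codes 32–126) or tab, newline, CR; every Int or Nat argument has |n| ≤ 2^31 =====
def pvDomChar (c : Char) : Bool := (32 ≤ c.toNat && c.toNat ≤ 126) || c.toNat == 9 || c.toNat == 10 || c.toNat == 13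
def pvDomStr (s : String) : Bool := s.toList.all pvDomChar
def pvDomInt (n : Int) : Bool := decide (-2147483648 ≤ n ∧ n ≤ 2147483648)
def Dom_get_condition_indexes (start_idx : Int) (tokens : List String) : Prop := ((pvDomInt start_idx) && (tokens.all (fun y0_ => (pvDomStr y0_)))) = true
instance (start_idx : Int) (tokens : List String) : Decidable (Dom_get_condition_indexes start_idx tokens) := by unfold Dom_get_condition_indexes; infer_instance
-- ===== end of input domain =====

-- B replaces A's single stateful while-loop over a mutable dict by a visited-pairs list,
-- a precomputed depth-before list, and three independent first-match searches (objective: alternative decomposition).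

-- ===== PORT A =====
-- A's while loop: state i (index), k (nesting depth), cond (the dict)
def pvLoopA (tokens : List String) (i k : Int) (cond : PySem.Dict String (Option Int)) :
    PySem.Dict String (Option Int) :=
  if _h : i < (tokens.length : Int) then
    match PySem.List.pyGet? tokens i with
    | none => cond  -- Python raises IndexError here (excluded by Pre_)
    | some t =>
      if t == "IF" then
        pvLoopA tokens (i + 1) (k + 1)
          (if (cond.getD "IF" none) == none then cond.insert "IF" (some i) else cond)
      else if t == "ELS" then
        pvLoopA tokens (i + 1) k
          (if k == 0 && (cond.getD "ELS" none) == none then cond.insert "ELS" (some i) else cond)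
      else if t == "FI" then
        pvLoopA tokens (i + 1) (k - 1)
          (if k == 0 && (cond.getD "FI" none) == none then cond.insert "FI" (some i) else cond)
      else
        pvLoopA tokens (i + 1) k cond
  else cond
termination_by ((tokens.length : Int) - i).toNat
decreasing_by all_goals omega

def get_condition_indexes (start_idx : Int) (tokens : List String) : List (String × Option Int) :=
  (pvLoopA tokens start_idx (-1)
    (PySem.Dict.ofList [("IF", none), ("ELS", none), ("FI", none)])).items

-- ===== PORT B =====
-- visited = [(i, tokens[i]) for i in range(start_idx, len(tokens))]
def pvVisited (start_idx : Int) (tokens : List String) : List (Int × String) :=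
  (PySem.List.pyRange start_idx (tokens.length : Int) 1).filterMap
    (fun i => (PySem.List.pyGet? tokens i).map (fun t => (i, t)))

-- depths: the running depth BEFORE each token; IF:+1, FI:-1
def pvDepths (k : Int) : List (Int × String) → List Int
  | [] => []
  | (_, tok) :: rest =>
      k :: pvDepths (if tok == "IF" then k + 1 else if tok == "FI" then k - 1 else k) rest

def get_condition_indexes_alt (start_idx : Int) (tokens : List String) : List (String × Option Int) :=
  let visited := pvVisited start_idx tokens
  let depths := pvDepths (-1) visited
  [("IF", (visited.find? (fun p => p.2 == "IF")).map (·.1)),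
   ("ELS", ((visited.zip depths).find? (fun p => p.1.2 == "ELS" && p.2 == 0)).map (·.1.1)),
   ("FI", ((visited.zip depths).find? (fun p => p.1.2 == "FI" && p.2 == 0)).map (·.1.1))]

-- ===== PRECONDITION & SPEC =====
-- Pre_ excludes exactly the inputs where A raises IndexError (tokens[i] with start_idx < -len(tokens)).
def Pre_get_condition_indexes (start_idx : Int) (tokens : List String) : Prop :=
  -(tokens.length : Int) ≤ start_idx
instance (start_idx : Int) (tokens : List String) : Decidable (Pre_get_condition_indexes start_idx tokens) := by unfold Pre_get_condition_indexes; infer_instance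
def pvWitness_get_condition_indexes : Int × List String := (0, ["IF", "X", "ELS", "FI"])

def Spec_get_condition_indexes (start_idx : Int) (tokens : List String) (out : List (String × Option Int)) : Prop := out = get_condition_indexes_alt start_idx tokens
instance (start_idx : Int) (tokens : List String) (out : List (String × Option Int)) : Decidable (Spec_get_condition_indexes start_idx tokens out) := by unfold Spec_get_condition_indexes; infer_instance

-- ===== CLAIM (what is proved, stated in full; the proofs are below) =====
def Claim_equal_get_condition_indexes : Prop := ∀ (start_idx : Int) (tokens : List String), Dom_get_condition_indexes start_idx tokens → Pre_get_condition_indexes start_idx tokens → Spec_get_condition_indexes start_idx tokens (get_condition_indexes start_idx tokens)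

-- ===== LEMMAS AND PROOFS =====

-- the 3-key dict A manipulates, and Python's "x if x is not None else y" choice
def pvD (a b c : Option Int) : PySem.Dict String (Option Int) :=
  PySem.Dict.ofList [("IF", a), ("ELS", b), ("FI", c)]

def pvOr (x y : Option Int) : Option Int :=
  match x with
  | some v => some v
  | none => y

-- recursive characterisations of B's three searches
def pvFindIF : List (Int × String) → Option Int
  | [] => none
  | (i, t) :: r => if t == "IF" then some i else pvFindIF r

def pvFindEls (key : String) (k : Int) : List (Int × String) → Option Int
  | [] => none
  | (i, t) :: r =>
      if t == "IF" then pvFindEls key (k + 1) r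
      else if t == "FI" then
        (if t = key ∧ k = 0 then some i else pvFindEls key (k - 1) r)
      else if t = key ∧ k = 0 then some i
      else pvFindEls key k r

lemma find?_IF (v : List (Int × String)) :
    (v.find? (fun p => p.2 == "IF")).map (·.1) = pvFindIF v := by
  induction v with
  | nil => rfl
  | cons p r ih =>
    obtain ⟨i, t⟩ := p
    by_cases h : t = "IF"
    · simp [pvFindIF, List.find?, h]
    · have hb : (t == "IF") = false := by simpa using h
      simp [pvFindIF, List.find?, hb, ih]

lemma find?_ELS (v : List (Int × String)) :
    ∀ k : Int, ((v.zip (pvDepths k v)).find? (fun p => p.1.2 == "ELS" && p.2 == 0)).map (·.1.1)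
      = pvFindEls "ELS" k v := by
  induction v with
  | nil => intro k; rfl
  | cons p r ih =>
    intro k
    obtain ⟨i, t⟩ := p
    by_cases hIF : t = "IF"
    · subst hIF
      simp [pvDepths, pvFindEls, List.find?,
        show (("IF" : String) == "ELS") = false from rfl,
        show (("IF" : String) == "IF") = true from rfl, ih]
    · by_cases hELS : t = "ELS"
      · subst hELS
        by_cases hz : k = 0
        · subst hz
          simp [pvDepths, pvFindEls, List.find?,
            show (("ELS" : String) == "IF") = false from rfl,
            show (("ELS" : String) == "FI") = false from rfl,
            show (("ELS" : String) == "ELS") = true from rfl]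
        · have hkz : (k == (0 : Int)) = false := by simpa using hz
          simp [pvDepths, pvFindEls, List.find?, hkz, hz,
            show (("ELS" : String) == "IF") = false from rfl,
            show (("ELS" : String) == "FI") = false from rfl,
            show (("ELS" : String) == "ELS") = true from rfl, ih]
      · by_cases hFI : t = "FI"
        · subst hFI
          simp [pvDepths, pvFindEls, List.find?,
            show (("FI" : String) == "ELS") = false from rfl,
            show (("FI" : String) == "IF") = false from rfl,
            show (("FI" : String) == "FI") = true from rfl, ih]
        · have h2 : (t == "ELS") = false := by simpa using hELS
          have h1 : (t == "IF") = false := by simpa using hIF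
          have h3 : (t == "FI") = false := by simpa using hFI
          simp [pvDepths, pvFindEls, List.find?, h1, h2, h3, hELS, ih]

lemma find?_FI (v : List (Int × String)) :
    ∀ k : Int, ((v.zip (pvDepths k v)).find? (fun p => p.1.2 == "FI" && p.2 == 0)).map (·.1.1)
      = pvFindEls "FI" k v := by
  induction v with
  | nil => intro k; rfl
  | cons p r ih =>
    intro k
    obtain ⟨i, t⟩ := p
    by_cases hIF : t = "IF"
    · subst hIF
      simp [pvDepths, pvFindEls, List.find?,
        show (("IF" : String) == "FI") = false from rfl,
        show (("IF" : String) == "IF") = true from rfl, ih]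
    · by_cases hELS : t = "ELS"
      · subst hELS
        simp [pvDepths, pvFindEls, List.find?,
          show (("ELS" : String) == "IF") = false from rfl,
          show (("ELS" : String) == "FI") = false from rfl, ih]
      · by_cases hFI : t = "FI"
        · subst hFI
          by_cases hz : k = 0
          · subst hz
            simp [pvDepths, pvFindEls, List.find?,
              show (("FI" : String) == "IF") = false from rfl,
              show (("FI" : String) == "FI") = true from rfl]
          · have hkz : (k == (0 : Int)) = false := by simpa using hz
            simp [pvDepths, pvFindEls, List.find?, hkz, hz,
              show (("FI" : String) == "IF") = false from rfl,
              show (("FI" : String) == "FI") = true from rfl, ih]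
        · have h2 : (t == "ELS") = false := by simpa using hELS
          have h1 : (t == "IF") = false := by simpa using hIF
          have h3 : (t == "FI") = false := by simpa using hFI
          simp [pvDepths, pvFindEls, List.find?, h1, h2, h3, hFI, ih]

lemma visited_nil (start_idx : Int) (tokens : List String)
    (h : (tokens.length : Int) ≤ start_idx) : pvVisited start_idx tokens = [] := by
  simp [pvVisited, PySem.List.pyRange_one_eq_nil h]

lemma visited_cons (i : Int) (tokens : List String) (t : String)
    (hlt : i < (tokens.length : Int)) (hget : PySem.List.pyGet? tokens i = some t) :
    pvVisited i tokens = (i, t) :: pvVisited (i + 1) tokens := by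
  rw [pvVisited, PySem.List.pyRange_one_cons hlt]
  simp [hget, pvVisited]

lemma pyGet?_some (tokens : List String) (i : Int)
    (h1 : -(tokens.length : Int) ≤ i) (h2 : i < (tokens.length : Int)) :
    ∃ t, PySem.List.pyGet? tokens i = some t := by
  rcases h : PySem.List.pyGet? tokens i with _ | t
  · rw [PySem.List.pyGet?_eq_none_iff] at h
    exact absurd ⟨h1, h2⟩ h
  · exact ⟨t, rfl⟩

-- main invariant: A's loop from (i, k, dict) = current value, else first match in the remaining visited tokens
lemma loopA_eq (tokens : List String) :
    ∀ (n : ℕ) (i : Int), (((tokens.length : Int) - i).toNat = n) →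
      -(tokens.length : Int) ≤ i →
      ∀ (k : Int) (a b c : Option Int),
      (pvLoopA tokens i k (pvD a b c)).items =
        [("IF", pvOr a (pvFindIF (pvVisited i tokens))),
         ("ELS", pvOr b (pvFindEls "ELS" k (pvVisited i tokens))),
         ("FI", pvOr c (pvFindEls "FI" k (pvVisited i tokens)))] := by
  intro n
  induction n with
  | zero =>
    intro i hn _hge k a b c
    have hge' : (tokens.length : Int) ≤ i := by omega
    rw [pvLoopA, visited_nil _ _ hge']
    simp only [not_lt.mpr hge', dif_neg (by omega : ¬ i < (tokens.length : Int))]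
    cases a <;> cases b <;> cases c <;> rfl
  | succ n ih =>
    intro i hn hge k a b c
    by_cases hlt : i < (tokens.length : Int)
    · obtain ⟨t, ht⟩ := pyGet?_some tokens i hge hlt
      rw [pvLoopA, dif_pos hlt, ht, visited_cons i tokens t hlt ht]
      have hrec := fun (k' : Int) (a' b' c' : Option Int) =>
        ih (i + 1) (by omega) (by omega) k' a' b' c'
      by_cases hIF : t = "IF"
      · subst hIF
        cases a with
        | none =>
          rw [show ((pvD none b c).getD "IF" none) = none from rfl]
          simp only [show (("IF" : String) == "IF") = true from rfl, if_true,
            show ((none : Option Int) == none) = true from rfl]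
          rw [show ((pvD none b c).insert "IF" (some i)) = pvD (some i) b c from rfl, hrec]
          simp [pvFindIF, pvFindEls, pvOr]
        | some x =>
          rw [show ((pvD (some x) b c).getD "IF" none) = some x from rfl]
          simp only [show (("IF" : String) == "IF") = true from rfl, if_true,
            show ((some x : Option Int) == none) = false from rfl, Bool.false_eq_true, if_false]
          rw [hrec]
          simp [pvFindIF, pvFindEls, pvOr]
      · by_cases hELS : t = "ELS"
        · subst hELS
          simp only [show (("ELS" : String) == "IF") = false from rfl, Bool.false_eq_true, if_false,
            show (("ELS" : String) == "ELS") = true from rfl, if_true]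
          rw [show ((pvD a b c).getD "ELS" none) = b from rfl]
          by_cases hz : k = 0
          · subst hz
            cases b with
            | none =>
              simp only [show ((0 : Int) == 0) = true from rfl,
                show ((none : Option Int) == none) = true from rfl, Bool.and_self, if_true]
              rw [show ((pvD a none c).insert "ELS" (some i)) = pvD a (some i) c from rfl, hrec]
              simp [pvFindIF, pvFindEls, pvOr]
            | some x =>
              simp only [show ((some x : Option Int) == none) = false from rfl, Bool.and_false,
                Bool.false_eq_true, if_false]
              rw [hrec]
              simp [pvFindIF, pvFindEls, pvOr]
          · have hkz : (k == (0 : Int)) = false := by simpa using hz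
            simp only [hkz, Bool.false_and, Bool.false_eq_true, if_false]
            rw [hrec]
            simp [pvFindIF, pvFindEls, pvOr, hz]
        · by_cases hFI : t = "FI"
          · subst hFI
            simp only [show (("FI" : String) == "IF") = false from rfl, Bool.false_eq_true, if_false,
              show (("FI" : String) == "ELS") = false from rfl,
              show (("FI" : String) == "FI") = true from rfl, if_true]
            rw [show ((pvD a b c).getD "FI" none) = c from rfl]
            by_cases hz : k = 0
            · subst hz
              cases c with
              | none =>
                simp only [show ((0 : Int) == 0) = true from rfl,
                  show ((none : Option Int) == none) = true from rfl, Bool.and_self, if_true]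
                rw [show ((pvD a b none).insert "FI" (some i)) = pvD a b (some i) from rfl, hrec]
                simp [pvFindIF, pvFindEls, pvOr]
              | some x =>
                simp only [show ((some x : Option Int) == none) = false from rfl, Bool.and_false,
                  Bool.false_eq_true, if_false]
                rw [hrec]
                simp [pvFindIF, pvFindEls, pvOr]
            · have hkz : (k == (0 : Int)) = false := by simpa using hz
              simp only [hkz, Bool.false_and, Bool.false_eq_true, if_false]
              rw [hrec]
              simp [pvFindIF, pvFindEls, pvOr, hz]
          · have h1 : (t == "IF") = false := by simpa using hIF
            have h2 : (t == "ELS") = false := by simpa using hELS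
            have h3 : (t == "FI") = false := by simpa using hFI
            simp only [h1, h2, h3, Bool.false_eq_true, if_false]
            rw [hrec]
            simp [pvFindIF, pvFindEls, pvOr, h1, h2, h3, hIF, hELS, hFI]
    · omega

-- ===== VERDICT (by name: the statement is the Claim_ definition above) =====
theorem get_condition_indexes_spec : Claim_equal_get_condition_indexes := by
  intro start_idx tokens _hdom hpre
  show get_condition_indexes start_idx tokens = get_condition_indexes_alt start_idx tokens
  rw [show get_condition_indexes start_idx tokens
        = (pvLoopA tokens start_idx (-1) (pvD none none none)).items from rfl,
      loopA_eq tokens (((tokens.length : Int) - start_idx).toNat) start_idx rfl hpre]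
  rw [get_condition_indexes_alt]
  rw [find?_IF, find?_ELS, find?_FI]
  rfl
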